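-- pv_equiv track=rewrite | github.com/Hariom-Jaiswal/code | playfair.py | textPair
-- ===== SOURCE A (Python) =====
-- def textPair(text):
--     text = text.replace('J', 'I')
--     pairs = []
--     i = 0
--
--     while i < len(text):
--         a = text[i]
--
--         if i+1 < len(text):
--             b = text[i+1]
--
--             if a == b:
--                 b = 'X'
--                 i += 1
--             else:
--                 i += 2
--         else:
--             b = 'X'
--             i += 1
--
--         pairs.append((a, b))
--
--     return pairs
-- ===== SOURCE B (Python) =====
-- def textPair(text):
--     pairs = []
--     a = None  # carried first half of the current pair
--     for c in text.replace('J', 'I'):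
--         if a is None:
--             a = c
--         elif c == a:
--             pairs.append((a, 'X'))
--             a = c
--         else:
--             pairs.append((a, c))
--             a = None
--     if a is not None:
--         pairs.append((a, 'X'))
--     return pairs
-- ===== Notes on version B (the rewrite author's own statement) =====
-- stated objective: alternative
-- what changed: Replaces the index-manipulating while loop with two-char lookahead by a single fold over the characters carrying an optional pending first-half character.
import Mathlib
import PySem

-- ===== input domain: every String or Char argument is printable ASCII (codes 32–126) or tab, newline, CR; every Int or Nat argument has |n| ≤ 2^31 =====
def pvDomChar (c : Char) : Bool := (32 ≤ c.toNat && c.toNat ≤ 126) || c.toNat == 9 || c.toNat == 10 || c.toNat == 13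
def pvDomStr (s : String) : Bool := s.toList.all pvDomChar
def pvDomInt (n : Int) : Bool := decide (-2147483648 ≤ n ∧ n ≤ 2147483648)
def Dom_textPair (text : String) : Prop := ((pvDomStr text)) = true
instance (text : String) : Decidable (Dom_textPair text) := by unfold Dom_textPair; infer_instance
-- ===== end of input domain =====

-- B changes decomposition only: a single fold with an optional carried character instead of an index-driven while loop with lookahead; same cost.

-- ===== PORT A =====
-- while loop of A: recursion on the index i, fuel cs.length - i
def textPairGoA (cs : List Char) (i : Nat) : List (String × String) :=
  if h : i < cs.length then
    let a := cs[i]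
    if h2 : i + 1 < cs.length then
      let b := cs[i + 1]
      if a = b then
        (String.ofList [a], "X") :: textPairGoA cs (i + 1)
      else
        (String.ofList [a], String.ofList [b]) :: textPairGoA cs (i + 2)
    else
      (String.ofList [a], "X") :: textPairGoA cs (i + 1)
  else
    []
termination_by cs.length - i

def textPair (text : String) : List (String × String) :=
  textPairGoA (PySem.Str.replace text "J" "I").toList 0

-- ===== PORT B =====
-- the body of B's for loop: state = (pairs so far, optional carried char)
def textPairStep (st : List (String × String) × Option Char) (c : Char) :
    List (String × String) × Option Char :=
  match st.2 with
  | none => (st.1, some c)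
  | some a =>
    if c = a then (st.1 ++ [(String.ofList [a], "X")], some c)
    else (st.1 ++ [(String.ofList [a], String.ofList [c])], none)

def textPair_alt (text : String) : List (String × String) :=
  let st := (PySem.Str.replace text "J" "I").toList.foldl textPairStep ([], none)
  match st.2 with
  | some a => st.1 ++ [(String.ofList [a], "X")]
  | none => st.1

-- ===== PRECONDITION & SPEC =====
def Spec_textPair (text : String) (out : List (String × String)) : Prop := out = textPair_alt text
instance (text : String) (out : List (String × String)) : Decidable (Spec_textPair text out) := by unfold Spec_textPair; infer_instance

-- ===== CLAIM (what is proved, stated in full; the proofs are below) =====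
def Claim_equal_textPair : Prop := ∀ (text : String), Dom_textPair text → Spec_textPair text (textPair text)

-- ===== LEMMAS AND PROOFS =====

-- proof-side recursive characterisation of the pairing, bridging both ports
def textPairRec : List Char → List (String × String)
  | [] => []
  | [a] => [(String.ofList [a], "X")]
  | a :: b :: rest =>
    if b = a then (String.ofList [a], "X") :: textPairRec (b :: rest)
    else (String.ofList [a], String.ofList [b]) :: textPairRec rest

def textPairFin (st : List (String × String) × Option Char) : List (String × String) :=
  match st.2 with
  | some a => st.1 ++ [(String.ofList [a], "X")]
  | none => st.1

lemma textPairGoA_eq (cs : List Char) (i : Nat) :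
    textPairGoA cs i = textPairRec (cs.drop i) := by
  induction hn : cs.length - i using Nat.strong_induction_on generalizing i with
  | _ n ih =>
    rw [textPairGoA]
    by_cases h : i < cs.length
    · have hdrop : cs.drop i = cs[i] :: cs.drop (i + 1) :=
        (List.getElem_cons_drop h).symm
      by_cases h2 : i + 1 < cs.length
      · have hdrop2 : cs.drop (i + 1) = cs[i + 1] :: cs.drop (i + 2) :=
          (List.getElem_cons_drop h2).symm
        rw [hdrop, hdrop2, textPairRec]
        simp only [h, h2, dif_pos]
        by_cases heq : cs[i] = cs[i + 1]
        · rw [ih (cs.length - (i + 1)) (by omega) (i + 1) rfl, hdrop2]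
          simp [heq]
        · have : ¬ cs[i + 1] = cs[i] := fun hh => heq hh.symm
          simp only [if_neg heq, if_neg this]
          rw [ih (cs.length - (i + 2)) (by omega) (i + 2) rfl]
      · have hdrop1 : cs.drop (i + 1) = [] := List.drop_eq_nil_of_le (by omega)
        rw [hdrop, hdrop1, textPairRec]
        simp only [h, dif_pos, h2, dif_neg, not_false_iff]
        rw [ih (cs.length - (i + 1)) (by omega) (i + 1) rfl, hdrop1, textPairRec]
    · rw [List.drop_eq_nil_of_le (by omega), textPairRec]
      simp [h]

lemma textPairFold_some (cs : List Char) (acc : List (String × String)) (a : Char) :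
    textPairFin (cs.foldl textPairStep (acc, some a)) = acc ++ textPairRec (a :: cs) := by
  induction hn : cs.length using Nat.strong_induction_on generalizing cs acc a with
  | _ n ih =>
    match cs with
    | [] => simp [textPairFin, textPairRec]
    | c :: rest =>
      rw [List.foldl_cons]
      by_cases heq : c = a
      · rw [show textPairStep (acc, some a) c
              = (acc ++ [(String.ofList [a], "X")], some c) by simp [textPairStep, heq]]
        rw [ih rest.length (by rw [List.length_cons] at hn; omega) rest _ c rfl, textPairRec]
        simp [heq]
      · rw [show textPairStep (acc, some a) c
              = (acc ++ [(String.ofList [a], String.ofList [c])], none) by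
            simp [textPairStep, heq]]
        match rest with
        | [] => simp [textPairFin, textPairRec, heq]
        | d :: rest2 =>
          rw [List.foldl_cons,
            show textPairStep (acc ++ [(String.ofList [a], String.ofList [c])], none) d
              = (acc ++ [(String.ofList [a], String.ofList [c])], some d) by rfl]
          rw [ih rest2.length (by simp only [List.length_cons] at hn; omega) rest2 _ d rfl, textPairRec]
          simp [heq, textPairRec]

lemma textPairFold_eq (cs : List Char) :
    textPairFin (cs.foldl textPairStep ([], none)) = textPairRec cs := by
  match cs with
  | [] => rfl
  | a :: rest =>
    rw [List.foldl_cons, show textPairStep ([], none) a = ([], some a) by rfl,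
      textPairFold_some]
    simp

-- ===== VERDICT (by name: the statement is the Claim_ definition above) =====
theorem textPair_spec : Claim_equal_textPair := by
  intro text _
  unfold Spec_textPair textPair textPair_alt
  rw [textPairGoA_eq, List.drop_zero]
  exact (textPairFold_eq _).symm
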